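-- pv_equiv track=rewrite | github.com/gukin-han/gukin-dev | content/posts/ecs-autoscaling-fitting/alarm_high_low.py | find_sustained_below
-- ===== SOURCE A (Python) =====
-- def find_sustained_below(values, threshold, count, start=0):
--     """값이 threshold 미만으로 count개 연속된 첫 인덱스 (start부터 검색)."""
--     consecutive = 0
--     for i in range(start, len(values)):
--         if values[i] < threshold:
--             consecutive += 1
--             if consecutive >= count:
--                 return i
--         else:
--             consecutive = 0
--     return None
-- ===== SOURCE B (Python) =====
-- def find_sustained_below(values, threshold, count, start=0):
--     """값이 threshold 미만으로 count개 연속된 첫 인덱스 (start부터 검색)."""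
--     need = max(count, 1)
--     for i in range(start + need - 1, len(values)):
--         if all(values[j] < threshold for j in range(i - need + 1, i + 1)):
--             return i
--     return None
-- ===== Notes on version B (the rewrite author's own statement) =====
-- stated objective: alternative
-- what changed: Replaces A's running consecutive-counter with a direct search for the first index i >= start+need-1 whose trailing window of need = max(count,1) values is entirely below threshold.
import Mathlib
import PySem

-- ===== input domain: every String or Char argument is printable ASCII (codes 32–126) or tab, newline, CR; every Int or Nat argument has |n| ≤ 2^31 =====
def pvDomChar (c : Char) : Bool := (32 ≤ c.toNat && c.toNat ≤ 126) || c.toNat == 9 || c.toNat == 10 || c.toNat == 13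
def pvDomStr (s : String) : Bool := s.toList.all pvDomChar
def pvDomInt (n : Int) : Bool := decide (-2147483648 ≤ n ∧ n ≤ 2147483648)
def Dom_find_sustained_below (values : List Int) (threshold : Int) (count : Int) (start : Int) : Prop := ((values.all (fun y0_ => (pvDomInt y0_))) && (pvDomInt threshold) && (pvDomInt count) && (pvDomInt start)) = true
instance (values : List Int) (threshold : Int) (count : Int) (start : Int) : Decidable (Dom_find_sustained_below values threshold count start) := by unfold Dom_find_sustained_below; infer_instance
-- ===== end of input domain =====

-- B replaces A's running consecutive-counter with a sliding-window check: the first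
-- index i ≥ start+need-1 whose trailing window of need = max(count,1) values is all
-- below threshold (alternative decomposition, not faster).


-- ===== PORT A =====
-- loop of A: i runs over range(start, len(values)) carrying the `consecutive` counter;
-- fuel is a pure totality guard (one unit per iteration, always sufficient at the call site)
def findSBGo (values : List Int) (threshold : Int) (count : Int) (fuel : Nat) (i : Int) (consecutive : Int) : Option Int :=
  match fuel with
  | 0 => none
  | Nat.succ f =>
    if i < (values.length : Int) then
      match PySem.List.pyGet? values i with
      | none => none      -- IndexError in Python; excluded by Pre_
      | some v =>
        if v < threshold then
          if count ≤ consecutive + 1 then some i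
          else findSBGo values threshold count f (i + 1) (consecutive + 1)
        else findSBGo values threshold count f (i + 1) 0
    else none

def find_sustained_below (values : List Int) (threshold : Int) (count : Int) (start : Int) : Option Int :=
  findSBGo values threshold count (((values.length : Int) - start).toNat + 1) start 0

-- ===== PORT B =====
-- values[j] < threshold (false where Python would raise; excluded by Pre_)
def belowAt (values : List Int) (threshold : Int) (j : Int) : Bool :=
  match PySem.List.pyGet? values j with
  | some v => decide (v < threshold)
  | none => false

-- all(values[j] < threshold for j in range(i - need + 1, i + 1))
def windowBelow (values : List Int) (threshold : Int) (need : Int) (i : Int) : Bool :=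
  (PySem.List.pyRange (i - need + 1) (i + 1) 1).all (fun j => belowAt values threshold j)

-- loop of B: i runs over range(start + need - 1, len(values)); fuel as in port A
def findSBAltGo (values : List Int) (threshold : Int) (need : Int) (fuel : Nat) (i : Int) : Option Int :=
  match fuel with
  | 0 => none
  | Nat.succ f =>
    if i < (values.length : Int) then
      if windowBelow values threshold need i then some i
      else findSBAltGo values threshold need f (i + 1)
    else none

def find_sustained_below_alt (values : List Int) (threshold : Int) (count : Int) (start : Int) : Option Int :=
  let need := max count 1
  findSBAltGo values threshold need (((values.length : Int) - (start + need - 1)).toNat + 1) (start + need - 1)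

-- ===== PRECONDITION & SPEC =====
-- Pre_ excludes exactly the inputs where A raises IndexError: start < -len(values)
-- (the first subscript values[start] is then out of range).
def Pre_find_sustained_below (values : List Int) (threshold : Int) (count : Int) (start : Int) : Prop :=
  -(values.length : Int) ≤ start
instance (values : List Int) (threshold : Int) (count : Int) (start : Int) : Decidable (Pre_find_sustained_below values threshold count start) := by unfold Pre_find_sustained_below; infer_instance

def pvWitness_find_sustained_below : List Int × Int × Int × Int := ([5, 1, 2, 9, 0, 0], 3, 2, 0)

def Spec_find_sustained_below (values : List Int) (threshold : Int) (count : Int) (start : Int) (out : Option Int) : Prop := out = find_sustained_below_alt values threshold count start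
instance (values : List Int) (threshold : Int) (count : Int) (start : Int) (out : Option Int) : Decidable (Spec_find_sustained_below values threshold count start out) := by unfold Spec_find_sustained_below; infer_instance

-- ===== CLAIM (what is proved, stated in full; the proofs are below) =====
def Claim_equal_find_sustained_below : Prop := ∀ (values : List Int) (threshold : Int) (count : Int) (start : Int), Dom_find_sustained_below values threshold count start → Pre_find_sustained_below values threshold count start → Spec_find_sustained_below values threshold count start (find_sustained_below values threshold count start)

-- ===== LEMMAS AND PROOFS =====

theorem findSBAltGo_of_ge (values : List Int) (threshold need : Int) (fuel : Nat) (k : Int)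
    (h : (values.length : Int) ≤ k) : findSBAltGo values threshold need fuel k = none := by
  cases fuel with
  | zero => rfl
  | succ f => unfold findSBAltGo; simp [not_lt.mpr h]

-- B's scan does not depend on the fuel once the fuel covers the remaining indices
theorem findSBAltGo_fuel (values : List Int) (threshold need : Int) :
    ∀ f1 f2 : Nat, ∀ k : Int, ((values.length : Int) - k).toNat < f1 → ((values.length : Int) - k).toNat < f2 →
      findSBAltGo values threshold need f1 k = findSBAltGo values threshold need f2 k := by
  intro f1
  induction f1 with
  | zero => intro f2 k h1 _; omega
  | succ f ih =>
    intro f2 k h1 h2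
    cases f2 with
    | zero => omega
    | succ g =>
      unfold findSBAltGo
      by_cases hk : k < (values.length : Int)
      · rw [if_pos hk, if_pos hk]
        by_cases hw : windowBelow values threshold need k
        · rw [if_pos hw, if_pos hw]
        · rw [if_neg hw, if_neg hw]
          exact ih g (k + 1) (by omega) (by omega)
      · rw [if_neg hk, if_neg hk]

-- skipping: once values[i] fails the test, every window containing index i fails,
-- so B's scan moves from any k ∈ [i, i+need] straight to i+need
theorem findSBAltGo_skip (values : List Int) (threshold need i : Int)
    (hbad : belowAt values threshold i = false) :
    ∀ f g : Nat, ∀ k : Int, i ≤ k → k ≤ i + need →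
      ((values.length : Int) - k).toNat < f → ((values.length : Int) - (i + need)).toNat < g →
      findSBAltGo values threshold need f k = findSBAltGo values threshold need g (i + need) := by
  intro f
  induction f with
  | zero => intro g k _ _ h1 _; omega
  | succ f ih =>
    intro g k hk1 hk2 h1 h2
    rcases eq_or_lt_of_le hk2 with heq | hlt
    · rw [heq]; exact findSBAltGo_fuel values threshold need (f + 1) g (i + need) (by omega) h2
    · by_cases hn : (values.length : Int) ≤ k
      · rw [findSBAltGo_of_ge values threshold need _ k hn,
          findSBAltGo_of_ge values threshold need g (i + need) (by omega)]
      · have hwin : windowBelow values threshold need k = false := by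
          unfold windowBelow
          rw [List.all_eq_false]
          exact ⟨i, (PySem.List.mem_pyRange_one).mpr ⟨by omega, by omega⟩, by simp [hbad]⟩
        rw [findSBAltGo]
        rw [if_pos (by omega), hwin]
        simp only [Bool.false_eq_true, if_false]
        exact ih g (k + 1) (by omega) (by omega) (by omega) h2

-- main invariant: with c consecutive below-values just before i (run starting no
-- earlier than start), A's scan from (i, c) equals B's scan from i + need - 1 - c
theorem findSB_key (values : List Int) (threshold count start : Int)
    (hpre : -(values.length : Int) ≤ start) :
    ∀ f : Nat, ∀ i c : Int, ∀ g : Nat, 0 ≤ c → c ≤ max count 1 - 1 → start ≤ i - c →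
      (∀ j, i - c ≤ j → j < i → belowAt values threshold j = true) →
      ((values.length : Int) - i).toNat < f →
      ((values.length : Int) - (i + max count 1 - 1 - c)).toNat < g →
      findSBGo values threshold count f i c
        = findSBAltGo values threshold (max count 1) g (i + max count 1 - 1 - c) := by
  intro f
  induction f with
  | zero => intro i c g _ _ _ _ hf _; omega
  | succ f ih =>
    intro i c g hc0 hcn hstart hrun hf hg
    have hneed : 1 ≤ max count 1 := le_max_right count 1
    by_cases hi : i < (values.length : Int)
    · have hget : ∃ v, PySem.List.pyGet? values i = some v := by
        cases hpg : PySem.List.pyGet? values i with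
        | some v => exact ⟨v, rfl⟩
        | none =>
          exfalso
          have := (PySem.List.pyGet?_eq_none_iff values i).mp hpg
          simp [PySem.Raise.InRange] at this
          omega
      rcases hget with ⟨v, hv⟩
      rw [findSBGo]
      rw [if_pos hi, hv]
      show (if v < threshold then
              if count ≤ c + 1 then some i else findSBGo values threshold count f (i + 1) (c + 1)
            else findSBGo values threshold count f (i + 1) 0)
          = findSBAltGo values threshold (max count 1) g (i + max count 1 - 1 - c)
      by_cases hb : v < threshold
      · have hbel : belowAt values threshold i = true := by
          unfold belowAt; rw [hv]; simp [hb]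
        rw [if_pos hb]
        by_cases hstop : count ≤ c + 1
        · -- A returns i; under the invariant c = max count 1 - 1, so B is at i and its window succeeds
          have hceq : c = max count 1 - 1 := by omega
          rw [if_pos hstop]
          have hwin : windowBelow values threshold (max count 1) i = true := by
            unfold windowBelow
            rw [List.all_eq_true]
            intro j hj
            have hj' := (PySem.List.mem_pyRange_one).mp hj
            rcases eq_or_lt_of_le (show j ≤ i by omega) with heq | hlt
            · rw [heq]; exact hbel
            · exact hrun j (by omega) hlt
          rw [show i + max count 1 - 1 - c = i by omega]
          cases g with
          | zero => omega
          | succ g' =>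
            rw [findSBAltGo, if_pos hi, hwin]
            simp
        · -- A continues with c+1; B's position is unchanged
          rw [if_neg hstop]
          have := ih (i + 1) (c + 1) g (by omega) (by omega) (by omega)
            (by
              intro j hj1 hj2
              rcases eq_or_lt_of_le (show j ≤ i by omega) with heq | hlt'
              · rw [heq]; exact hbel
              · exact hrun j (by omega) hlt')
            (by omega) (by rw [show i + 1 + max count 1 - 1 - (c + 1) = i + max count 1 - 1 - c by omega]; exact hg)
          rw [this]
          congr 1
          omega
      · -- values[i] not below: A resets to 0; B skips every window containing i
        have hbad : belowAt values threshold i = false := by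
          unfold belowAt; rw [hv]; simp [hb]
        rw [if_neg hb]
        have := ih (i + 1) 0 (((values.length : Int) - (i + max count 1)).toNat + 1)
          (le_refl 0) (by omega) (by omega) (by intro j h1 h2; omega) (by omega)
          (by rw [show i + 1 + max count 1 - 1 - 0 = i + max count 1 by omega]; omega)
        rw [this]
        rw [show i + 1 + max count 1 - 1 - 0 = i + max count 1 by omega]
        exact (findSBAltGo_skip values threshold (max count 1) i hbad g
          (((values.length : Int) - (i + max count 1)).toNat + 1)
          (i + max count 1 - 1 - c) (by omega) (by omega) hg (by omega)).symm
    · rw [findSBGo, if_neg hi,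
        findSBAltGo_of_ge values threshold (max count 1) g _ (by omega)]

-- ===== VERDICT (by name: the statement is the Claim_ definition above) =====
theorem find_sustained_below_spec : Claim_equal_find_sustained_below := by
  intro values threshold count start _hdom hpre
  unfold Spec_find_sustained_below find_sustained_below find_sustained_below_alt
  have := findSB_key values threshold count start hpre
    (((values.length : Int) - start).toNat + 1) start 0
    (((values.length : Int) - (start + max count 1 - 1)).toNat + 1)
    (le_refl 0) (by omega) (by omega) (by intro j h1 h2; omega) (by omega)
    (by rw [show start + max count 1 - 1 - 0 = start + max count 1 - 1 by omega]; omega)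
  rw [show start + max count 1 - 1 - 0 = start + max count 1 - 1 by omega] at this
  exact this
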